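-- pv_equiv track=rewrite | github.com/jo49973477/codetree-TILs | 240720/2차원 폭발 게임/The-2D-bomb-game.py | boom
-- ===== SOURCE A (Python) =====
-- def boom(bombs, M):
--     N = len(bombs)
--     didExplode = False
--
--     for col in range(N):
--         repeat = 1
--         for row in range(N):
--             if bombs[row][col] == 0:
--                 continue
--             elif row == N-1 or bombs[row][col] != bombs[row+1][col]:
--                 if repeat >= M:
--                     didExplode = True
--                     for i in range(repeat):
--                         bombs[row-i][col] = 0
--                 repeat = 1
--             elif bombs[row][col] == bombs[row+1][col]:
--                 repeat += 1
--
--     return bombs, didExplode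
-- ===== SOURCE B (Python) =====
-- def boom(bombs, M):
--     n = len(bombs)
--     exploded = False
--     for col in range(n):
--         column = [bombs[r][col] for r in range(n)]
--         r = 0
--         while r < n:
--             run_end = r
--             while run_end < n and column[run_end] == column[r]:
--                 run_end += 1
--             if column[r] != 0 and run_end - r >= M:
--                 exploded = True
--                 for k in range(r, run_end):
--                     bombs[k][col] = 0
--             r = run_end
--     return bombs, exploded
-- ===== Notes on version B (the rewrite author's own statement) =====
-- stated objective: simpler
-- what changed: Replaced A's stateful row scan (running repeat counter, last-row special case, backward clearing from the run end) by per-column run chunking: snapshot the column, find each maximal run's extent with a forward two-pointer, and clear qualifying runs forward.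
import Mathlib
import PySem

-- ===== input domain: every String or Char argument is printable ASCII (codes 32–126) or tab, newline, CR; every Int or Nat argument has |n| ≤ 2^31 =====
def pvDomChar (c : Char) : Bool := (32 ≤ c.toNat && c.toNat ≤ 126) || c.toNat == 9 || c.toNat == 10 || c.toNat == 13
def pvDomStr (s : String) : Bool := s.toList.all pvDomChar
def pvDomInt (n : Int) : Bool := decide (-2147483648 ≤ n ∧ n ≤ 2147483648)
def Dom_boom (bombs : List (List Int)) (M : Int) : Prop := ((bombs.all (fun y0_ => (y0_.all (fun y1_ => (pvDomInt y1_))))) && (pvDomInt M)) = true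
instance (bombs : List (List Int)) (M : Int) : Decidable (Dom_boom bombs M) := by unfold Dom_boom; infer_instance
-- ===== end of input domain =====

-- B replaces A's stateful row scan (repeat counter, last-row case, backward clearing)
-- by per-column run chunking with a forward two-pointer; both mutate the grid in Python,
-- and both Python versions perform the same in-place writes (only clearing cells to 0).

-- shared low-level grid access (Python bombs[r][c] read / write; in range on Pre_boom)
def get2 (g : List (List Int)) (r c : Nat) : Int := (g.getD r []).getD c 0
def set2 (g : List (List Int)) (r c : Nat) (v : Int) : List (List Int) :=
  g.set r ((g.getD r []).set c v)

-- ===== PORT A =====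
def stepA (col N : Nat) (M : Int) (st : List (List Int) × Bool × Nat) (row : Nat) :
    List (List Int) × Bool × Nat :=
  let g := st.1
  let de := st.2.1
  let rep := st.2.2
  let v := get2 g row col
  if v = 0 then (g, de, rep)
  else if row = N - 1 ∨ get2 g (row + 1) col ≠ v then
    if (rep : Int) ≥ M then
      ((List.range rep).foldl (fun g' i => set2 g' (row - i) col 0) g, true, 1)
    else (g, de, 1)
  else (g, de, rep + 1)

def boom (bombs : List (List Int)) (M : Int) : List (List Int) × Bool :=
  let N := bombs.length
  (List.range N).foldl
    (fun (st : List (List Int) × Bool) col =>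
      let r := (List.range N).foldl (stepA col N M) (st.1, st.2, 1)
      (r.1, r.2.1))
    (bombs, false)

-- ===== PORT B =====
-- snapshot of one column (Python: [bombs[r][col] for r in range(n)])
def colOf (g : List (List Int)) (c n : Nat) : List Int :=
  (List.range n).map (fun r => get2 g r c)

-- inner while: advance run_end while it sees column[r]
def runEndAux (cs : List Int) (n : Nat) (v : Int) (j : Nat) : Nat :=
  if _h : j < n ∧ cs.getD j 0 = v then runEndAux cs n v (j + 1) else j
termination_by n - j
decreasing_by omega

theorem runEndAux_ge (cs : List Int) (n : Nat) (v : Int) (j : Nat) :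
    j ≤ runEndAux cs n v j := by
  fun_induction runEndAux with
  | case1 j _h ih => omega
  | case2 j _h => omega

-- Python: for k in range(r, run_end): bombs[k][col] = 0
def clearSegB (g : List (List Int)) (col r e : Nat) : List (List Int) :=
  (List.range' r (e - r)).foldl (fun g' k => set2 g' k col 0) g

-- outer while over run starts
def colLoopB (cs : List Int) (n col : Nat) (M : Int) (g : List (List Int)) (ex : Bool)
    (r : Nat) : List (List Int) × Bool :=
  if h : r < n then
    let e := runEndAux cs n (cs.getD r 0) r
    if cs.getD r 0 ≠ 0 ∧ (e : Int) - (r : Int) ≥ M then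
      colLoopB cs n col M (clearSegB g col r e) true e
    else
      colLoopB cs n col M g ex e
  else (g, ex)
termination_by n - r
decreasing_by
  all_goals
    have : r + 1 ≤ runEndAux cs n (cs.getD r 0) r := by
      rw [runEndAux]; simp only [h, and_self]
      exact runEndAux_ge cs n (cs.getD r 0) (r + 1)
    omega

def boom_alt (bombs : List (List Int)) (M : Int) : List (List Int) × Bool :=
  let n := bombs.length
  (List.range n).foldl
    (fun (st : List (List Int) × Bool) col =>
      colLoopB (colOf st.1 col n) n col M st.1 st.2 0)
    (bombs, false)

-- ===== PRECONDITION & SPEC =====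
-- Pre_boom: Python A indexes bombs[row][col] for all row, col < len(bombs); it raises
-- IndexError on any grid with a row shorter than the number of rows, so exactly those
-- inputs are excluded (it returns normally on every other input).
def Pre_boom (bombs : List (List Int)) (M : Int) : Prop :=
  ∀ row ∈ bombs, bombs.length ≤ row.length

instance (bombs : List (List Int)) (M : Int) : Decidable (Pre_boom bombs M) := by
  unfold Pre_boom; infer_instance

def pvWitness_boom : List (List Int) × Int := ([[1, 1], [1, 2]], 2)

def Spec_boom (bombs : List (List Int)) (M : Int) (out : List (List Int) × Bool) : Prop :=
  out = boom_alt bombs M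
instance (bombs : List (List Int)) (M : Int) (out : List (List Int) × Bool) :
    Decidable (Spec_boom bombs M out) := by unfold Spec_boom; infer_instance

-- ===== CLAIM (what is proved, stated in full; the proofs are below) =====
def Claim_equal_boom : Prop :=
  ∀ (bombs : List (List Int)) (M : Int), Dom_boom bombs M → Pre_boom bombs M →
    Spec_boom bombs M (boom bombs M)

-- ===== LEMMAS AND PROOFS =====

-- pure (single-list) versions of the two column passes, used only by the proof

def clearSegL (ys : List Int) (row rep : Nat) : List Int :=
  (List.range rep).foldl (fun ys' i => ys'.set (row - i) 0) ys

def zeroRangeL (ys : List Int) (r e : Nat) : List Int :=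
  (List.range' r (e - r)).foldl (fun ys' k => ys'.set k 0) ys

def procA (cs : List Int) (n : Nat) (M : Int) (row : Nat) (ys : List Int) (de : Bool)
    (rep : Nat) : List Int × Bool :=
  if _h : row < n then
    let v := cs.getD row 0
    if v = 0 then procA cs n M (row + 1) ys de rep
    else if row = n - 1 ∨ cs.getD (row + 1) 0 ≠ v then
      if (rep : Int) ≥ M then procA cs n M (row + 1) (clearSegL ys row rep) true 1
      else procA cs n M (row + 1) ys de 1
    else procA cs n M (row + 1) ys de (rep + 1)
  else (ys, de)
termination_by n - row
decreasing_by all_goals omega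

def procB (cs : List Int) (n : Nat) (M : Int) (r : Nat) (ys : List Int) (ex : Bool) :
    List Int × Bool :=
  if h : r < n then
    let e := runEndAux cs n (cs.getD r 0) r
    if cs.getD r 0 ≠ 0 ∧ (e : Int) - (r : Int) ≥ M then
      procB cs n M e (zeroRangeL ys r e) true
    else procB cs n M e ys ex
  else (ys, ex)
termination_by n - r
decreasing_by
  all_goals
    have : r + 1 ≤ runEndAux cs n (cs.getD r 0) r := by
      rw [runEndAux]; simp only [h, and_self]
      exact runEndAux_ge cs n (cs.getD r 0) (r + 1)
    omega

-- grid with one column overwritten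
def writeCol (g : List (List Int)) (c : Nat) (ys : List Int) : List (List Int) :=
  g.mapIdx (fun r row => row.set c (ys.getD r 0))

def Shape (g : List (List Int)) (N : Nat) : Prop :=
  g.length = N ∧ ∀ row ∈ g, N ≤ row.length

theorem getD_colOf (g : List (List Int)) (c n i : Nat) :
    (colOf g c n).getD i 0 = if i < n then get2 g i c else 0 := by
  simp [colOf, List.getD_eq_getElem?_getD]
  split_ifs <;> simp_all

theorem length_colOf (g : List (List Int)) (c n : Nat) : (colOf g c n).length = n := by
  simp [colOf]

theorem shape_writeCol (g : List (List Int)) (c : Nat) (ys : List Int) (N : Nat)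
    (hs : Shape g N) : Shape (writeCol g c ys) N := by
  refine ⟨by simp [writeCol, hs.1], ?_⟩
  intro row hrow
  rw [List.mem_iff_getElem] at hrow
  obtain ⟨i, hi, hrow⟩ := hrow
  simp only [writeCol, List.getElem_mapIdx] at hrow
  subst hrow
  rw [List.length_set]
  exact hs.2 _ (List.getElem_mem _)

theorem writeCol_self (g : List (List Int)) (c N : Nat) (hs : Shape g N) (hc : c < N) :
    writeCol g c (colOf g c N) = g := by
  have hgl : g.length = N := hs.1
  apply List.ext_getElem?
  intro i
  simp only [writeCol, List.getElem?_mapIdx]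
  by_cases hi : i < g.length
  · have hcl : c < (g[i]).length := lt_of_lt_of_le (hgl ▸ hc) (hs.2 _ (List.getElem_mem hi))
    rw [List.getElem?_eq_getElem hi, Option.map_some]
    congr 1
    rw [getD_colOf, if_pos (by omega)]
    have hg2 : get2 g i c = g[i][c] := by
      simp [get2, List.getD_eq_getElem?_getD, List.getElem?_eq_getElem hi,
        List.getElem?_eq_getElem hcl]
    rw [hg2]
    exact List.set_getElem_self hcl
  · rw [List.getElem?_eq_none (by omega)]; rfl

theorem get2_writeCol (g : List (List Int)) (c : Nat) (ys : List Int) (N : Nat)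
    (hs : Shape g N) (hc : c < N) (hy : ys.length = N) (r : Nat) :
    get2 (writeCol g c ys) r c = ys.getD r 0 := by
  have hgl : g.length = N := hs.1
  by_cases hr : r < g.length
  · have hrow : (writeCol g c ys).getD r [] = (g[r]).set c (ys.getD r 0) := by
      simp [writeCol, List.getD_eq_getElem?_getD, List.getElem?_mapIdx,
        List.getElem?_eq_getElem hr]
    have hcl : c < (g[r]).length := lt_of_lt_of_le (hgl ▸ hc) (hs.2 _ (List.getElem_mem hr))
    simp only [get2]
    rw [hrow]
    simp [List.getD_eq_getElem?_getD, hcl]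
  · have h1 : (writeCol g c ys).getD r [] = [] := by
      rw [List.getD_eq_getElem?_getD, List.getElem?_eq_none (by simp [writeCol]; omega)]; rfl
    have h2 : ys.getD r 0 = 0 := by
      rw [List.getD_eq_getElem?_getD, List.getElem?_eq_none (by omega)]; rfl
    simp only [get2]
    rw [h1, h2]
    rfl

theorem set2_writeCol (g : List (List Int)) (c : Nat) (ys : List Int) (N : Nat)
    (hs : Shape g N) (_hc : c < N) (hy : ys.length = N) (k : Nat) (v : Int) :
    set2 (writeCol g c ys) k c v = writeCol g c (ys.set k v) := by
  have hgl : g.length = N := hs.1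
  apply List.ext_getElem?
  intro i
  simp only [set2, writeCol, List.getElem?_set, List.getElem?_mapIdx, List.length_mapIdx]
  rcases eq_or_ne k i with rfl | hik
  · by_cases hi : k < g.length
    · simp only [hi, List.getElem?_eq_getElem hi, Option.map_some]
      have hrow : (g.mapIdx (fun r row => row.set c (ys.getD r 0))).getD k [] =
          (g[k]).set c (ys.getD k 0) := by
        simp [List.getD_eq_getElem?_getD, List.getElem?_mapIdx, List.getElem?_eq_getElem hi]
      rw [hrow, List.set_set]
      congr 1
      simp [List.getD_eq_getElem?_getD, show k < ys.length by omega]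
    · simp [if_neg hi, List.getElem?_eq_none (by omega : g.length ≤ k)]
  · simp only [if_neg hik]
    by_cases hi : i < g.length
    · rw [List.getElem?_eq_getElem hi]
      simp [List.getD_eq_getElem?_getD, hik]
    · rw [List.getElem?_eq_none (by omega)]
      simp

theorem foldl_set2_writeCol (g : List (List Int)) (c : Nat) (N : Nat)
    (hs : Shape g N) (hc : c < N) (L : List Nat) :
    ∀ (ys : List Int), ys.length = N →
      L.foldl (fun g' k => set2 g' k c 0) (writeCol g c ys)
        = writeCol g c (L.foldl (fun ys' k => ys'.set k 0) ys) := by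
  induction L with
  | nil => intro ys _; rfl
  | cons k L ih =>
    intro ys hy
    simp only [List.foldl_cons]
    rw [set2_writeCol g c ys N hs hc hy, ih (ys.set k 0) (by simp [hy])]

theorem length_foldl_set (L : List Nat) :
    ∀ (ys : List Int), (L.foldl (fun ys' k => ys'.set k 0) ys).length = ys.length := by
  induction L with
  | nil => intro ys; rfl
  | cons k L ih => intro ys; simpa [List.foldl_cons] using ih (ys.set k 0)

theorem getElem?_foldl_set (L : List Nat) :
    ∀ (ys : List Int) (j : Nat),
      (L.foldl (fun ys' k => ys'.set k 0) ys)[j]?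
        = if j ∈ L ∧ j < ys.length then some 0 else ys[j]? := by
  induction L with
  | nil => intro ys j; simp
  | cons k L ih =>
    intro ys j
    simp only [List.foldl_cons]
    rw [ih]
    simp only [List.length_set, List.mem_cons, List.getElem?_set]
    by_cases hj : j < ys.length
    · by_cases hjL : j ∈ L
      · simp [hjL, hj]
      · by_cases hkj : k = j
        · simp [hjL, hj, hkj]
        · simp [hjL, hj, hkj, Ne.symm hkj]
    · have hnone : ys[j]? = none := List.getElem?_eq_none (by omega)
      by_cases hkj : k = j
      · simp [hj, hkj]
      · simp [hj, hkj, Ne.symm hkj]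

-- clearing backwards from the run end = clearing the run forwards
theorem clearSegL_as_map (ys : List Int) (row rep : Nat) :
    clearSegL ys row rep
      = ((List.range rep).map (fun i => row - i)).foldl (fun ys' k => ys'.set k 0) ys := by
  rw [clearSegL, List.foldl_map]

theorem clearSegL_eq_zeroRangeL (ys : List Int) (r e : Nat) (h : r < e) :
    clearSegL ys (e - 1) (e - r) = zeroRangeL ys r e := by
  apply List.ext_getElem?
  intro j
  rw [clearSegL_as_map, zeroRangeL, getElem?_foldl_set, getElem?_foldl_set]
  have hmem : (j ∈ (List.range (e - r)).map (fun i => e - 1 - i)) ↔ j ∈ List.range' r (e - r) := by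
    simp only [List.mem_map, List.mem_range, List.mem_range'_1]
    constructor
    · rintro ⟨i, hi, rfl⟩; omega
    · rintro ⟨h1, h2⟩; exact ⟨e - 1 - j, by omega, by omega⟩
  simp only [hmem]

theorem getD_clearSegL_high (ys : List Int) (row rep j : Nat) (h : row < j) :
    (clearSegL ys row rep).getD j 0 = ys.getD j 0 := by
  rw [List.getD_eq_getElem?_getD, List.getD_eq_getElem?_getD, clearSegL_as_map,
    getElem?_foldl_set]
  rw [if_neg]
  rintro ⟨hmem, -⟩
  simp only [List.mem_map, List.mem_range] at hmem
  obtain ⟨i, -, hi⟩ := hmem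
  omega

theorem length_clearSegL (ys : List Int) (row rep : Nat) :
    (clearSegL ys row rep).length = ys.length := by
  simpa [clearSegL, List.foldl_map] using
    length_foldl_set ((List.range rep).map (fun i => row - i)) ys

theorem length_zeroRangeL (ys : List Int) (r e : Nat) :
    (zeroRangeL ys r e).length = ys.length := by
  simpa [zeroRangeL, List.foldl_map] using length_foldl_set (List.range' r (e - r)) ys

-- runEndAux characterisation
theorem runEndAux_le (cs : List Int) (n : Nat) (v : Int) (j : Nat) (h : j ≤ n) :
    runEndAux cs n v j ≤ n := by
  fun_induction runEndAux with
  | case1 j h' ih => exact ih (by omega)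
  | case2 j h' => omega

theorem runEndAux_run (cs : List Int) (n : Nat) (v : Int) (j : Nat) :
    ∀ k, j ≤ k → k < runEndAux cs n v j → cs.getD k 0 = v := by
  fun_induction runEndAux with
  | case1 j h ih =>
      intro k hk1 hk2
      rcases Nat.eq_or_lt_of_le hk1 with rfl | hlt
      · exact h.2
      · exact ih k hlt hk2
  | case2 j h => intro k hk1 hk2; omega

theorem runEndAux_stop (cs : List Int) (n : Nat) (v : Int) (j : Nat)
    (h : runEndAux cs n v j < n) : cs.getD (runEndAux cs n v j) 0 ≠ v := by
  fun_induction runEndAux with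
  | case1 j h' ih => exact ih h
  | case2 j h' => intro hv; exact h' ⟨h, hv⟩

theorem runEndAux_start (cs : List Int) (n : Nat) (r : Nat) (h : r < n) :
    r + 1 ≤ runEndAux cs n (cs.getD r 0) r := by
  rw [runEndAux]; simp only [h, and_self]
  exact runEndAux_ge cs n (cs.getD r 0) (r + 1)

-- A's scan skips a zero block without touching its state
theorem procA_skip_zeros (cs : List Int) (n : Nat) (M : Int) :
    ∀ d r ys de rep, r + d ≤ n → (∀ j, r ≤ j → j < r + d → cs.getD j 0 = 0) →
      procA cs n M r ys de rep = procA cs n M (r + d) ys de rep := by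
  intro d
  induction d with
  | zero => intro r ys de rep _ _; rfl
  | succ d ih =>
    intro r ys de rep hle hz
    have hr : r < n := by omega
    have hv : cs.getD r 0 = 0 := hz r (le_refl r) (by omega)
    rw [procA]
    simp only [hr, dif_pos, hv, if_pos]
    rw [show r + (d + 1) = (r + 1) + d from by omega]
    exact ih (r + 1) ys de rep (by omega) (fun j hj1 hj2 => hz j (by omega) (by omega))

-- A's scan walks a nonzero run and clears it iff it is long enough
theorem procA_run (cs : List Int) (n : Nat) (M : Int) (e : Nat) (he : e ≤ n)
    (hstop : e = n ∨ cs.getD e 0 ≠ cs.getD (e - 1) 0) :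
    ∀ d r ys de rep, r + d = e - 1 → r < e →
      (∀ j, r ≤ j → j < e → cs.getD j 0 = cs.getD r 0) → cs.getD r 0 ≠ 0 →
      procA cs n M r ys de rep =
        (if ((rep : Int) + ((e - 1 - r : Nat) : Int) ≥ M) then
          procA cs n M e (clearSegL ys (e - 1) (rep + (e - 1 - r))) true 1
        else procA cs n M e ys de 1) := by
  intro d
  induction d with
  | zero =>
    intro r ys de rep hd hre hrun hv0
    have hr : r < n := by omega
    have he1 : r = e - 1 := by omega
    rw [procA]
    simp only [hr, dif_pos]
    rw [if_neg hv0]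
    have hcond : r = n - 1 ∨ cs.getD (r + 1) 0 ≠ cs.getD r 0 := by
      rcases hstop with hn | hne
      · left; omega
      · right
        rw [show r + 1 = e by omega, ← hrun (e - 1) (by omega) (by omega)]
        exact hne
    rw [if_pos hcond]
    have hre1 : r + 1 = e := by omega
    have hz : ((e - 1 - r : Nat) : Int) = 0 := by omega
    rw [hz, add_zero, show rep + (e - 1 - r) = rep by omega, hre1]
    rw [show e - 1 = r from he1.symm]
  | succ d ih =>
    intro r ys de rep hd hre hrun hv0
    have hr : r < n := by omega
    rw [procA]
    simp only [hr, dif_pos]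
    rw [if_neg hv0]
    have hnext : cs.getD (r + 1) 0 = cs.getD r 0 := hrun (r + 1) (by omega) (by omega)
    have hcond : ¬ (r = n - 1 ∨ cs.getD (r + 1) 0 ≠ cs.getD r 0) := by
      rintro (h1 | h2)
      · omega
      · exact h2 hnext
    rw [if_neg hcond]
    have hrun' : ∀ j, r + 1 ≤ j → j < e → cs.getD j 0 = cs.getD (r + 1) 0 := by
      intro j h1 h2
      rw [hrun j (by omega) h2, hnext]
    have := ih (r + 1) ys de (rep + 1) (by omega) (by omega) hrun'
      (by rw [hnext]; exact hv0)
    rw [this]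
    have harith : ((rep + 1 : Nat) : Int) + ((e - 1 - (r + 1) : Nat) : Int)
        = ((rep : Nat) : Int) + ((e - 1 - r : Nat) : Int) := by omega
    have harith2 : (rep + 1) + (e - 1 - (r + 1)) = rep + (e - 1 - r) := by omega
    rw [harith, harith2]

-- the heart: counter scan = run chunking
theorem procA_eq_procB (cs : List Int) (n : Nat) (M : Int) :
    ∀ r ys de, procA cs n M r ys de 1 = procB cs n M r ys de := by
  have main : ∀ m r ys de, n - r ≤ m → procA cs n M r ys de 1 = procB cs n M r ys de := by
    intro m
    induction m with
    | zero =>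
      intro r ys de h
      rw [procA, procB]
      have hr : ¬ r < n := by omega
      simp [hr]
    | succ m ih =>
      intro r ys de hm
      by_cases hr : r < n
      · have hge : r + 1 ≤ runEndAux cs n (cs.getD r 0) r := runEndAux_start cs n r hr
        have hle : runEndAux cs n (cs.getD r 0) r ≤ n :=
          runEndAux_le cs n (cs.getD r 0) r (by omega)
        set v := cs.getD r 0 with hv
        set e := runEndAux cs n v r with he
        have hrun : ∀ j, r ≤ j → j < e → cs.getD j 0 = v :=
          fun j h1 h2 => runEndAux_run cs n v r j h1 h2
        rw [procB]
        simp only [hr, dif_pos]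
        rw [← he, ← hv]
        by_cases hz : v = 0
        · rw [if_neg (by simp [hz])]
          rw [procA_skip_zeros cs n M (e - r) r ys de 1 (by omega)
            (fun j h1 h2 => by rw [hrun j h1 (by omega), hz])]
          rw [show r + (e - r) = e by omega]
          exact ih e ys de (by omega)
        · have hstop : e = n ∨ cs.getD e 0 ≠ cs.getD (e - 1) 0 := by
            rcases lt_or_ge e n with hlt | hge2
            · right
              rw [hrun (e - 1) (by omega) (by omega)]
              exact runEndAux_stop cs n v r hlt
            · left; omega
          rw [procA_run cs n M e hle hstop (e - 1 - r) r ys de 1 (by omega) (by omega)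
            (fun j h1 h2 => by rw [hrun j h1 h2]) hz]
          have hiff : (((1 : Nat) : Int) + ((e - 1 - r : Nat) : Int) ≥ M)
              ↔ ((e : Int) - (r : Int) ≥ M) := by omega
          by_cases hM : (e : Int) - (r : Int) ≥ M
          · rw [if_pos (hiff.mpr hM), if_pos ⟨hz, hM⟩]
            rw [show 1 + (e - 1 - r) = e - r by omega,
              clearSegL_eq_zeroRangeL ys r e (by omega)]
            exact ih e _ true (by omega)
          · rw [if_neg (fun hc => hM (hiff.mp hc)), if_neg (fun hc => hM hc.2)]
            exact ih e ys de (by omega)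
      · rw [procA, procB]
        simp [hr]
  intro r ys de
  exact main (n - r) r ys de le_rfl

-- grid-level inner loop of A = writeCol ∘ pure procA
theorem foldA_writeCol (g : List (List Int)) (c N : Nat) (M : Int)
    (hs : Shape g N) (hc : c < N) :
    ∀ k r ys de rep, r + k = N → ys.length = N →
      (∀ j, r ≤ j → ys.getD j 0 = (colOf g c N).getD j 0) →
      ∃ rep', (List.range' r k).foldl (stepA c N M) (writeCol g c ys, de, rep)
        = (writeCol g c (procA (colOf g c N) N M r ys de rep).1,
           (procA (colOf g c N) N M r ys de rep).2, rep') := by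
  intro k
  induction k with
  | zero =>
    intro r ys de rep hrk hy hsuf
    rw [procA, dif_neg (show ¬ r < N by omega)]
    exact ⟨rep, rfl⟩
  | succ k ih =>
    intro r ys de rep hrk hy hsuf
    have hrN : r < N := by omega
    have hv : get2 (writeCol g c ys) r c = (colOf g c N).getD r 0 := by
      rw [get2_writeCol g c ys N hs hc hy r, hsuf r le_rfl]
    have hv1 : get2 (writeCol g c ys) (r + 1) c = (colOf g c N).getD (r + 1) 0 := by
      rw [get2_writeCol g c ys N hs hc hy (r + 1), hsuf (r + 1) (by omega)]
    rw [List.range'_succ, List.foldl_cons, stepA]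
    simp only [hv, hv1]
    rw [procA]
    simp only [hrN, dif_pos]
    by_cases hz : (colOf g c N).getD r 0 = 0
    · rw [if_pos hz, if_pos hz]
      exact ih (r + 1) ys de rep (by omega) hy (fun j hj => hsuf j (by omega))
    · rw [if_neg hz, if_neg hz]
      by_cases hcond : r = N - 1 ∨ (colOf g c N).getD (r + 1) 0 ≠ (colOf g c N).getD r 0
      · rw [if_pos hcond, if_pos hcond]
        by_cases hM : (rep : Int) ≥ M
        · rw [if_pos hM, if_pos hM]
          have hset : (List.range rep).foldl (fun g' i => set2 g' (r - i) c 0)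
              (writeCol g c ys) = writeCol g c (clearSegL ys r rep) := by
            rw [show (List.range rep).foldl (fun g' i => set2 g' (r - i) c 0)
                  (writeCol g c ys)
                = ((List.range rep).map (fun i => r - i)).foldl
                    (fun g' k' => set2 g' k' c 0) (writeCol g c ys) from by
              rw [List.foldl_map]]
            rw [foldl_set2_writeCol g c N hs hc _ ys hy, clearSegL_as_map]
          rw [hset]
          exact ih (r + 1) (clearSegL ys r rep) true 1 (by omega)
            (by rw [length_clearSegL, hy])
            (fun j hj => by rw [getD_clearSegL_high ys r rep j (by omega)]
                            exact hsuf j (by omega))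
        · rw [if_neg hM, if_neg hM]
          exact ih (r + 1) ys de 1 (by omega) hy (fun j hj => hsuf j (by omega))
      · rw [if_neg hcond, if_neg hcond]
        exact ih (r + 1) ys de (rep + 1) (by omega) hy (fun j hj => hsuf j (by omega))

-- grid-level loop of B = writeCol ∘ pure procB
theorem loopB_writeCol (g : List (List Int)) (c N : Nat) (M : Int) (cs : List Int)
    (hs : Shape g N) (hc : c < N) :
    ∀ r ys de, ys.length = N →
      colLoopB cs N c M (writeCol g c ys) de r
        = (writeCol g c (procB cs N M r ys de).1, (procB cs N M r ys de).2) := by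
  have main : ∀ m r ys de, N - r ≤ m → ys.length = N →
      colLoopB cs N c M (writeCol g c ys) de r
        = (writeCol g c (procB cs N M r ys de).1, (procB cs N M r ys de).2) := by
    intro m
    induction m with
    | zero =>
      intro r ys de hm hy
      rw [colLoopB, procB]
      have hr : ¬ r < N := by omega
      simp [hr]
    | succ m ih =>
      intro r ys de hm hy
      by_cases hr : r < N
      · have hge : r + 1 ≤ runEndAux cs N (cs.getD r 0) r := runEndAux_start cs N r hr
        rw [colLoopB, procB]
        simp only [hr, dif_pos]
        by_cases hcond : cs.getD r 0 ≠ 0 ∧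
            ((runEndAux cs N (cs.getD r 0) r : Nat) : Int) - (r : Int) ≥ M
        · rw [if_pos hcond, if_pos hcond]
          have hclear : clearSegB (writeCol g c ys) c r (runEndAux cs N (cs.getD r 0) r)
              = writeCol g c (zeroRangeL ys r (runEndAux cs N (cs.getD r 0) r)) := by
            rw [clearSegB, zeroRangeL, foldl_set2_writeCol g c N hs hc _ ys hy]
          rw [hclear]
          exact ih _ _ true (by omega) (by rw [length_zeroRangeL, hy])
        · rw [if_neg hcond, if_neg hcond]
          exact ih _ ys de (by omega) hy
      · rw [colLoopB, procB]
        simp [hr]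
  intro r ys de hy
  exact main (N - r) r ys de le_rfl hy

-- per-column step equality at grid level
theorem colStep_eq (g : List (List Int)) (c N : Nat) (M : Int) (de : Bool)
    (hs : Shape g N) (hc : c < N) :
    (let r := (List.range N).foldl (stepA c N M) (g, de, 1); (r.1, r.2.1))
      = colLoopB (colOf g c N) N c M g de 0 := by
  have hy : (colOf g c N).length = N := length_colOf g c N
  have hself : writeCol g c (colOf g c N) = g := writeCol_self g c N hs hc
  obtain ⟨rep', hfold⟩ := foldA_writeCol g c N M hs hc N 0 (colOf g c N) de 1
    (by omega) hy (fun j _ => rfl)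
  have hB := loopB_writeCol g c N M (colOf g c N) hs hc 0 (colOf g c N) de hy
  simp only [List.range_eq_range']
  rw [show (g, de, 1) = (writeCol g c (colOf g c N), de, 1) from by rw [hself], hfold]
  rw [show colLoopB (colOf g c N) N c M g de 0
      = colLoopB (colOf g c N) N c M (writeCol g c (colOf g c N)) de 0 from by rw [hself],
    hB]
  rw [procA_eq_procB]

theorem colStepB_shape (g : List (List Int)) (c N : Nat) (M : Int) (de : Bool)
    (hs : Shape g N) (hc : c < N) :
    Shape (colLoopB (colOf g c N) N c M g de 0).1 N := by
  have hy : (colOf g c N).length = N := length_colOf g c N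
  have hself : writeCol g c (colOf g c N) = g := writeCol_self g c N hs hc
  have hB := loopB_writeCol g c N M (colOf g c N) hs hc 0 (colOf g c N) de hy
  rw [hself] at hB
  rw [hB]
  exact shape_writeCol g c _ N hs

theorem outer_fold (N : Nat) (M : Int) :
    ∀ (cols : List Nat), (∀ col ∈ cols, col < N) →
    ∀ (g : List (List Int)) (de : Bool), Shape g N →
      (cols.foldl (fun (st : List (List Int) × Bool) col =>
          let r := (List.range N).foldl (stepA col N M) (st.1, st.2, 1)
          (r.1, r.2.1)) (g, de)
        = cols.foldl (fun (st : List (List Int) × Bool) col =>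
            colLoopB (colOf st.1 col N) N col M st.1 st.2 0) (g, de))
      ∧ Shape (cols.foldl (fun (st : List (List Int) × Bool) col =>
            colLoopB (colOf st.1 col N) N col M st.1 st.2 0) (g, de)).1 N := by
  intro cols
  induction cols with
  | nil => intro _ g de hs; exact ⟨rfl, hs⟩
  | cons c cols ih =>
    intro hmem g de hs
    have hc : c < N := hmem c (List.mem_cons_self)
    have hstep := colStep_eq g c N M de hs hc
    simp only [List.foldl_cons]
    have hshape := colStepB_shape g c N M de hs hc
    obtain ⟨ih1, ih2⟩ := ih (fun col h => hmem col (List.mem_cons_of_mem c h))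
      (colLoopB (colOf g c N) N c M g de 0).1
      (colLoopB (colOf g c N) N c M g de 0).2 hshape
    constructor
    · rw [hstep]
      exact ih1
    · exact ih2

-- ===== VERDICT (by name: the statement is the Claim_ definition above) =====
theorem boom_spec : Claim_equal_boom := by
  intro bombs M hdom hpre
  unfold Spec_boom
  show boom bombs M = boom_alt bombs M
  rw [boom, boom_alt]
  have hs : Shape bombs bombs.length := ⟨rfl, hpre⟩
  exact (outer_fold bombs.length M (List.range bombs.length)
    (fun col h => List.mem_range.mp h) bombs false hs).1
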